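-- pv_equiv track=rewrite | github.com/ASSERT-KTH/Mokav | experiments/pynguin/c4b/return-lst/generated_tests/src_1271/9/src_1271.py | func
-- ===== SOURCE A (Python) =====
-- def func(*args):
-- 	ret_values = []
--
-- 	k = int(args[0])
-- 	a = args[1].split()
-- 	ans = 0
-- 	for i in range(len(a)):
-- 	    a[i] = int(a[i])
-- 	for i in reversed(sorted(a)):
-- 	    if (k < 1):
-- 	        break
-- 	    k -= i
-- 	    ans += 1
-- 	if (k < 1):
-- 	    ret_values.append(ans)
-- 	else:
-- 	    ret_values.append((- 1))
--
-- 	return ret_values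
-- ===== SOURCE B (Python) =====
-- def func(*args):
--     k = int(args[0])
--     nums = sorted(int(t) for t in args[1].split())  # ascending
--     total = sum(nums)
--     count = len(nums)
--     best = -1
--     if total >= k:
--         best = count
--     for x in nums:          # peel off the smallest elements, back-to-front scan
--         total -= x
--         count -= 1
--         if total >= k:
--             best = count    # smaller counts overwrite: last write = minimal count
--     return [best]
-- ===== Notes on version B (the rewrite author's own statement) =====
-- stated objective: alternative
-- what changed: B sorts ascending and scans back-to-front: it starts from the total sum, peels off the smallest elements one at a time with no early exit, and overwrites the answer with the remaining count whenever the remaining sum still reaches k, instead of A's greedy largest-first accumulation with a break.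
import Mathlib
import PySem

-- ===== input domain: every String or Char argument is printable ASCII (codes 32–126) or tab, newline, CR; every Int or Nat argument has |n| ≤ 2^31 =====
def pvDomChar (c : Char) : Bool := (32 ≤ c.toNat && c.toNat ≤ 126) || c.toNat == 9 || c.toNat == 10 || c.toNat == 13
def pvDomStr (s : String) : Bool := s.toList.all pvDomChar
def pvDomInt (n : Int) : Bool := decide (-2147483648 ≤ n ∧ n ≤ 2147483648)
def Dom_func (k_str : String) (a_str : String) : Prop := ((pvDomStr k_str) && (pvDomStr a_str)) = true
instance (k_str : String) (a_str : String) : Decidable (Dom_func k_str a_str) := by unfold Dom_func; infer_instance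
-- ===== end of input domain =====

-- B sorts ascending and scans back-to-front from the total sum, peeling off the smallest
-- elements with no early exit, instead of A's greedy largest-first accumulation (alternative
-- decomposition, same cost).

-- ===== PORT A =====
-- the greedy loop: for i in reversed(sorted(a)): if k < 1: break; k -= i; ans += 1
def funcLoopA : List Int → Int → Int → Int × Int
  | [], k, ans => (k, ans)
  | i :: rest, k, ans => if k < 1 then (k, ans) else funcLoopA rest (k - i) (ans + 1)

def func (k_str : String) (a_str : String) : List Int :=
  match PySem.Int.ofStr? k_str with
  | none => []  -- int(args[0]) raises ValueError; excluded by Pre_func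
  | some k =>
    match (PySem.Str.split₀ a_str).mapM PySem.Int.ofStr? with
    | none => []  -- int(a[i]) raises ValueError; excluded by Pre_func
    | some a =>
      let (k', ans) := funcLoopA ((PySem.List.sorted a (fun x => x) false).reverse) k 0
      if k' < 1 then [ans] else [-1]

-- ===== PORT B =====
-- for x in nums: total -= x; count -= 1; if total >= k: best = count
def bLoop (k : Int) : List Int → Int → Int → Int → Int
  | [], _, _, best => best
  | x :: rest, total, count, best =>
      bLoop k rest (total - x) (count - 1) (if total - x ≥ k then count - 1 else best)

def func_alt (k_str : String) (a_str : String) : List Int :=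
  match PySem.Int.ofStr? k_str with
  | none => []  -- int(args[0]) raises ValueError; excluded by Pre_func
  | some k =>
    match (PySem.Str.split₀ a_str).mapM PySem.Int.ofStr? with
    | none => []  -- int(t) raises ValueError; excluded by Pre_func
    | some xs =>
      let nums := PySem.List.sorted xs (fun x => x) false   -- ascending
      let total := nums.sum
      let count : Int := nums.length
      let best : Int := if total ≥ k then count else -1
      [bLoop k nums total count best]

-- ===== PRECONDITION & SPEC =====
-- Pre_func: exactly the inputs where int() succeeds on k_str and on every whitespace-split
-- token of a_str (elsewhere the Python raises ValueError).
def Pre_func (k_str : String) (a_str : String) : Prop :=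
  (PySem.Int.ofStr? k_str).isSome = true ∧
  ∀ t ∈ PySem.Str.split₀ a_str, (PySem.Int.ofStr? t).isSome = true

instance (k_str : String) (a_str : String) : Decidable (Pre_func k_str a_str) := by
  unfold Pre_func; infer_instance

def pvWitness_func : String × String := ("3", "1 2")

def Spec_func (k_str : String) (a_str : String) (out : List Int) : Prop := out = func_alt k_str a_str
instance (k_str : String) (a_str : String) (out : List Int) : Decidable (Spec_func k_str a_str out) := by unfold Spec_func; infer_instance

-- ===== CLAIM (what is proved, stated in full; the proofs are below) =====
def Claim_equal_func : Prop := ∀ (k_str : String) (a_str : String), Dom_func k_str a_str → Pre_func k_str a_str → Spec_func k_str a_str (func k_str a_str)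

-- ===== LEMMAS AND PROOFS =====

-- prefix sums of ys starting at s: [s, s+y0, s+y0+y1, …]
def bSums : List Int → Int → List Int
  | [], s => [s]
  | x :: rest, s => s :: bSums rest (s + x)

-- first-crossing scan of a sum table (proof-layer specification)
def bScan : List Int → Int → Int → List Int
  | [], _, _ => [-1]
  | t :: rest, k, count => if t ≥ k then [count] else bScan rest k (count + 1)

-- index (as Int) of the first element ≥ k
def firstSat? : List Int → Int → Option Int
  | [], _ => none
  | t :: rest, k => if t ≥ k then some 0 else (firstSat? rest k).map (· + 1)

-- A's greedy loop equals the first-crossing scan of the prefix-sum table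
lemma loop_eq_scan (ys : List Int) (k s ans : Int) :
    (let p := funcLoopA ys k ans; if p.1 < 1 then [p.2] else [-1]) =
      bScan (bSums ys s) (k + s) ans := by
  induction ys generalizing k s ans with
  | nil =>
      simp only [funcLoopA, bSums, bScan]
      by_cases h : k < 1
      · rw [if_pos h, if_pos (by omega : s ≥ k + s)]
      · rw [if_neg h, if_neg (by omega : ¬ s ≥ k + s)]
  | cons x rest ih =>
      simp only [funcLoopA, bSums, bScan]
      by_cases h : k < 1
      · rw [if_pos h, if_pos (by omega : s ≥ k + s)]
        simp [h]
      · rw [if_neg h, if_neg (by omega : ¬ s ≥ k + s)]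
        have := ih (k - x) (s + x) (ans + 1)
        simpa [(by ring : k - x + (s + x) = k + s)] using this

lemma bScan_eq_firstSat (sums : List Int) (k c : Int) :
    bScan sums k c = (firstSat? sums k).elim [-1] (fun m => [c + m]) := by
  induction sums generalizing c with
  | nil => simp [bScan, firstSat?]
  | cons t rest ih =>
      simp only [bScan, firstSat?]
      by_cases h : t ≥ k
      · simp [h]
      · rw [if_neg h, if_neg h, ih]
        cases hf : firstSat? rest k with
        | none => simp
        | some m =>
            simp only [Option.map_some, Option.elim]
            congr 1
            all_goals omega

lemma firstSat?_append (l1 l2 : List Int) (k : Int) :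
    firstSat? (l1 ++ l2) k =
      match firstSat? l1 k with
      | some m => some m
      | none => (firstSat? l2 k).map (· + (l1.length : Int)) := by
  induction l1 with
  | nil => simp [firstSat?]
  | cons t rest ih =>
      simp only [List.cons_append, firstSat?, ih]
      by_cases h : t ≥ k
      · simp [h]
      · rw [if_neg h, if_neg h]
        cases hf : firstSat? rest k with
        | some m => simp
        | none =>
            cases hg : firstSat? l2 k with
            | none => simp
            | some m =>
                simp only [Option.map_some]
                congr 1
                simp only [List.length_cons]
                push_cast
                omega

lemma bSums_length (l : List Int) (s : Int) : (bSums l s).length = l.length + 1 := by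
  induction l generalizing s with
  | nil => simp [bSums]
  | cons x rest ih => simp [bSums, ih]

lemma bSums_snoc (l : List Int) (x s : Int) :
    bSums (l ++ [x]) s = bSums l s ++ [s + l.sum + x] := by
  induction l generalizing s with
  | nil => simp [bSums]
  | cons y rest ih =>
      simp only [List.cons_append, bSums, ih, List.sum_cons]
      have h : s + y + rest.sum + x = s + (y + rest.sum) + x := by ring
      rw [h]

lemma bSums_decomp (l : List Int) (s : Int) :
    bSums l s = (bSums l s).dropLast ++ [s + l.sum] := by
  induction l generalizing s with
  | nil => simp [bSums]
  | cons x rest ih =>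
      simp only [bSums, List.sum_cons]
      have hne : bSums rest (s + x) ≠ [] := by
        cases rest <;> simp [bSums]
      rw [List.dropLast_cons_of_ne_nil hne]
      have := ih (s + x)
      conv_lhs => rw [this]
      simp [add_assoc]

lemma dropLast_length_bSums (l : List Int) (s : Int) :
    ((bSums l s).dropLast).length = l.length := by
  simp [List.length_dropLast, bSums_length]

-- B's loop equals the first-crossing search of the proper prefix sums of the reversed list
lemma bLoop_eq (a : List Int) : ∀ (k s c best : Int),
    bLoop k a (s + a.sum) c best =
      (firstSat? ((bSums a.reverse s).dropLast) k).elim best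
        (fun m => m + (c - (a.length : Int))) := by
  induction a with
  | nil => intro k s c best; simp [bLoop, bSums, firstSat?]
  | cons x r ih =>
      intro k s c best
      have hstep : bLoop k (x :: r) (s + (x :: r).sum) c best =
          bLoop k r (s + r.sum) (c - 1) (if s + r.sum ≥ k then c - 1 else best) := by
        simp only [bLoop, List.sum_cons]
        congr 1 <;> [ring; skip]
        by_cases h : s + r.sum ≥ k
        · rw [if_pos h, if_pos (by omega : s + (x + r.sum) - x ≥ k)]
        · rw [if_neg h, if_neg (by omega : ¬ s + (x + r.sum) - x ≥ k)]
      rw [hstep, ih k s (c - 1) _]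
      -- right-hand side: (x :: r).reverse = r.reverse ++ [x]
      have hsums : bSums ((x :: r).reverse) s = bSums r.reverse s ++ [s + r.sum + x] := by
        rw [List.reverse_cons, bSums_snoc, List.sum_reverse]
      rw [hsums]
      have hne2 : bSums r.reverse s ≠ [] := by cases r.reverse <;> simp [bSums]
      rw [List.dropLast_concat]
      conv_rhs => rw [bSums_decomp r.reverse s, List.sum_reverse]
      rw [firstSat?_append]
      cases hf : firstSat? ((bSums r.reverse s).dropLast) k with
      | some m =>
          simp only [Option.elim, List.length_cons]
          push_cast
          omega
      | none =>
          simp only [firstSat?]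
          by_cases h : s + r.sum ≥ k
          · simp only [h, if_true, Option.map_some, Option.elim,
              dropLast_length_bSums, List.length_reverse]
            simp only [List.length_cons]
            push_cast
            omega
          · simp [h]

-- ===== VERDICT (by name: the statement is the Claim_ definition above) =====
theorem func_spec : Claim_equal_func := by
  intro k_str a_str _ hpre
  unfold Spec_func func func_alt
  obtain ⟨hk, ha⟩ := hpre
  cases hks : PySem.Int.ofStr? k_str with
  | none => exact absurd hk (by rw [hks]; simp)
  | some k =>
    cases has : (PySem.Str.split₀ a_str).mapM PySem.Int.ofStr? with
    | none =>
        exfalso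
        have : ∀ (ts : List String), (∀ t ∈ ts, (PySem.Int.ofStr? t).isSome = true) →
            (ts.mapM PySem.Int.ofStr?).isSome = true := by
          intro ts hts
          induction ts with
          | nil => simp
          | cons t r ih =>
              have h1 := hts t (by simp)
              obtain ⟨v, hv⟩ := Option.isSome_iff_exists.mp h1
              have h2 := ih (fun u hu => hts u (by simp [hu]))
              obtain ⟨vs, hvs⟩ := Option.isSome_iff_exists.mp h2
              simp [List.mapM_cons, hv, hvs]
        have := this _ ha
        rw [has] at this; simp at this
    | some xs =>
        simp only []
        set nums := PySem.List.sorted xs (fun x => x) false with hnums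
        -- A side: greedy loop = first-crossing scan over all prefix sums of nums.reverse
        have hA := loop_eq_scan (nums.reverse) k 0 0
        simp only [add_zero] at hA
        rw [hA, bScan_eq_firstSat]
        -- B side
        have hB := bLoop_eq nums k 0 (nums.length : Int)
          (if nums.sum ≥ k then (nums.length : Int) else -1)
        simp only [zero_add] at hB
        rw [hB]
        cases hf : firstSat? ((bSums nums.reverse 0).dropLast) k with
        | some m =>
            rw [bSums_decomp nums.reverse 0, firstSat?_append, hf]
            simp [Option.elim]
        | none =>
            rw [bSums_decomp nums.reverse 0, firstSat?_append, hf, List.sum_reverse]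
            simp only [firstSat?, Option.elim]
            by_cases h' : nums.sum ≥ k
            · rw [if_pos (by omega : (0:Int) + nums.sum ≥ k), if_pos h']
              simp [bSums_length]
            · rw [if_neg (by omega : ¬ (0:Int) + nums.sum ≥ k), if_neg h']
              simp
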